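-- pv_equiv track=rewrite | github.com/jegny100/textcomplexity | parser_functions.py | extract_file_parts
-- ===== SOURCE A (Python) =====
-- def extract_file_parts(text):
--     '''
--     Löschen der [[File: ... ]] Teile im Text
--     Return: gefilterter String (Text)
--     '''
--     result = []
--     stack = []
--     current_part = ''
--
--     for char in text:
--         current_part += char
--
--         if char == '[':
--             stack.append('[')
--         elif char == ']':
--             if stack:
--                 stack.pop()
--             else:
--                 # Wenn die schließende Klammer keine passende öffnende Klammer hat
--                 current_part = ''
--
--         if not stack:
--             # Wenn die äußerste Klammer erreicht wurde
--             if current_part.startswith('[[File:'):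
--                 result.append(current_part.strip())
--             current_part = ''
--
--     for match in result:
--         text = text.replace(match, '')
--
--     return text
-- ===== SOURCE B (Python) =====
-- def extract_file_parts(text):
--     '''
--     Löschen der [[File: ... ]] Teile im Text
--     Return: gefilterter String (Text)
--     '''
--     matches = []
--     depth = 0
--     start = 0
--     for i, ch in enumerate(text):
--         if ch == '[':
--             if depth == 0:
--                 start = i
--             depth += 1
--         elif ch == ']':
--             if depth > 0:
--                 depth -= 1
--                 if depth == 0:
--                     part = text[start:i + 1]
--                     if part.startswith('[[File:'):
--                         matches.append(part)
--     for m in matches: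
--         text = text.replace(m, '')
--     return text
-- ===== Notes on version B (the rewrite author's own statement) =====
-- stated objective: faster
-- what changed: Replaces A's explicit bracket stack and per-character string accumulation with an integer depth counter plus a recorded group-start index, extracting each balanced group by a single slice; the final replace pass is kept.
import Mathlib
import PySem

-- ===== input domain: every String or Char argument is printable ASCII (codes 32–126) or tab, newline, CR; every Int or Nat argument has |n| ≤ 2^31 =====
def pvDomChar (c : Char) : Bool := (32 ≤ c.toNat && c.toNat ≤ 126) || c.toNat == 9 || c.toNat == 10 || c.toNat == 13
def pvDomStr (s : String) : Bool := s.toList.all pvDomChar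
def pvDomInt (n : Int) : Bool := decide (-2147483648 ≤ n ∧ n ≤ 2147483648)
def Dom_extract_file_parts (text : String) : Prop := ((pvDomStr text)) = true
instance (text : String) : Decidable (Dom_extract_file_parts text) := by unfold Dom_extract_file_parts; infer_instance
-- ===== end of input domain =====

-- B replaces A's bracket stack and per-character string accumulation by a depth counter
-- plus a group-start index with one slice per balanced group (measured constant-factor speed-up).

-- ===== PORT A =====
def pvTag : List Char := ['[', '[', 'F', 'i', 'l', 'e', ':']

-- one iteration of A's 'for char in text' loop; state = (result, stack, current_part)
def pvStepA (s : List (List Char) × List Char × List Char) (c : Char) :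
    List (List Char) × List Char × List Char :=
  let cur := s.2.2 ++ [c]
  let sc : List Char × List Char :=
    if c = '[' then (s.2.1 ++ ['['], cur)
    else if c = ']' then (if s.2.1 = [] then (s.2.1, []) else (s.2.1.dropLast, cur))
    else (s.2.1, cur)
  if sc.1 = [] then
    (if PySem.Chars.startswith sc.2 pvTag then s.1 ++ [PySem.Chars.strip sc.2] else s.1,
     sc.1, [])
  else (s.1, sc.1, sc.2)

def extract_file_parts (text : String) : String :=
  let fin := text.toList.foldl pvStepA ([], [], [])
  String.ofList (fin.1.foldl (fun t m => PySem.Chars.replace t m []) text.toList)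

-- ===== PORT B =====
-- one iteration of B's 'for i, ch in enumerate(text)' loop; state = (matches, depth, start)
def pvStepB (cs : List Char) (s : List (List Char) × Int × Int) (ic : Int × Char) :
    List (List Char) × Int × Int :=
  if ic.2 = '[' then
    (s.1, s.2.1 + 1, if s.2.1 = 0 then ic.1 else s.2.2)
  else if ic.2 = ']' then
    if 0 < s.2.1 then
      if s.2.1 - 1 = 0 then
        let part := PySem.List.slice cs (some s.2.2) (some (ic.1 + 1))
        (if PySem.Chars.startswith part pvTag then s.1 ++ [part] else s.1, s.2.1 - 1, s.2.2)
      else (s.1, s.2.1 - 1, s.2.2)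
    else s
  else s

def extract_file_parts_alt (text : String) : String :=
  let cs := text.toList
  let fin := (PySem.List.enumerate cs).foldl (pvStepB cs) ([], 0, 0)
  String.ofList (fin.1.foldl (fun t m => PySem.Chars.replace t m []) cs)

-- ===== PRECONDITION & SPEC =====
def Spec_extract_file_parts (text : String) (out : String) : Prop := out = extract_file_parts_alt text
instance (text : String) (out : String) : Decidable (Spec_extract_file_parts text out) := by unfold Spec_extract_file_parts; infer_instance

-- ===== CLAIM (what is proved, stated in full; the proofs are below) =====
def Claim_equal_extract_file_parts : Prop := ∀ (text : String), Dom_extract_file_parts text → Spec_extract_file_parts text (extract_file_parts text)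

-- ===== LEMMAS AND PROOFS =====

lemma pv_startswith_nil : PySem.Chars.startswith [] pvTag = false := by decide

-- strip is a no-op on a group: it starts with '[' and ends with ']'
lemma pv_strip_eq_self (cs : List Char) (h1 : cs.head? = some '[') (h2 : cs.getLast? = some ']') :
    PySem.Chars.strip cs = cs := by
  obtain ⟨c, t, rfl⟩ : ∃ c t, cs = c :: t := by
    cases cs with
    | nil => simp at h1
    | cons c t => exact ⟨c, t, rfl⟩
  have hc : c = '[' := by simpa using h1
  subst hc
  obtain ⟨u, hu⟩ : ∃ u, ('[' :: t).reverse = ']' :: u := by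
    cases hr : ('[' :: t).reverse with
    | nil => simp at hr
    | cons a u =>
      have : ('[' :: t).reverse.head? = some ']' := by
        rw [List.head?_reverse]; exact h2
      rw [hr] at this
      simp at this
      exact ⟨u, by rw [this]⟩
  have hsp1 : PySem.Chars.isspace '[' = false := by decide
  have hsp2 : PySem.Chars.isspace ']' = false := by decide
  unfold PySem.Chars.strip PySem.Chars.lstrip PySem.Chars.rstrip
  rw [List.dropWhile_cons, hsp1]
  simp only [Bool.false_eq_true, if_false, hu, List.dropWhile_cons, hsp2]
  rw [← hu, List.reverse_reverse]

lemma pv_startswith_single (c : Char) (_hc : c ≠ '[') :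
    PySem.Chars.startswith [c] pvTag = false := by
  rw [Bool.eq_false_iff]
  intro h
  have hl := ((PySem.Chars.startswith_iff _ _).1 h).length_le
  simp [pvTag] at hl

-- extending the scanned prefix by one character keeps the group-in-progress facts
lemma pv_inv_extend (pre : List Char) (c : Char) (start : Nat)
    (hlt : start < pre.length) (hidx : pre[start]? = some '[') :
    start < (pre ++ [c]).length ∧ (pre ++ [c])[start]? = some '[' ∧
      pre.drop start ++ [c] = (pre ++ [c]).drop start := by
  refine ⟨by simp; omega, ?_, ?_⟩
  · rw [List.getElem?_append_left hlt]; exact hidx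
  · rw [List.drop_append_of_le_length (le_of_lt hlt)]

-- cast bookkeeping
lemma pv_len_cast (l : List Char) (c : Char) :
    (((l ++ [c]).length : Nat) : Int) = (l.length : Int) + 1 := by
  push_cast [List.length_append]; simp

-- main loop invariant: from a related pair of states, A's loop over the remaining
-- characters and B's loop over their enumeration produce the same match list
lemma pv_loop (rest : List Char) :
    ∀ (pre : List Char) (result : List (List Char)) (stack cur : List Char) (sb : Int),
    (stack = [] → cur = []) →
    (stack ≠ [] → ∃ start : Nat, sb = (start : Int) ∧ start < pre.length ∧
        pre[start]? = some '[' ∧ cur = pre.drop start) →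
    (rest.foldl pvStepA (result, stack, cur)).1 =
      ((PySem.List.enumerate rest (pre.length : Int)).foldl (pvStepB (pre ++ rest))
        (result, (stack.length : Int), sb)).1 := by
  induction rest with
  | nil => intro pre result stack cur sb _ _; simp [PySem.List.enumerate]
  | cons c rest ih =>
    intro pre result stack cur sb h0 h1
    rw [PySem.List.enumerate_cons, List.foldl_cons, List.foldl_cons]
    have hpre : pre ++ c :: rest = (pre ++ [c]) ++ rest := by simp
    have hn : ((pre ++ [c]).length : Int) = (pre.length : Int) + 1 := pv_len_cast pre c
    by_cases hc1 : c = '['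
    · subst hc1
      have ha : pvStepA (result, stack, cur) '[' = (result, stack ++ ['['], cur ++ ['[']) := by
        simp [pvStepA]
      have hb : pvStepB (pre ++ '[' :: rest) (result, (stack.length : Int), sb)
          ((pre.length : Int), '[') =
          (result, (stack.length : Int) + 1,
            if (stack.length : Int) = 0 then (pre.length : Int) else sb) := by
        simp [pvStepB]
      rw [ha, hb, hpre]
      have hL : (((stack ++ ['[']).length : Nat) : Int) = (stack.length : Int) + 1 :=
        pv_len_cast stack '['
      rw [← hn, ← hL]
      apply ih (pre ++ ['[']) result (stack ++ ['[']) (cur ++ ['['])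
      · intro h; simp at h
      · intro _
        by_cases hstack : stack = []
        · subst hstack
          refine ⟨pre.length, ?_, by simp, by simp, ?_⟩
          · simp
          · rw [h0 rfl]; simp
        · obtain ⟨start, rfl, hlt, hidx, rfl⟩ := h1 hstack
          have hL0 : (stack.length : Int) ≠ 0 := by
            simp [List.length_eq_zero_iff]; exact hstack
          obtain ⟨ha1, ha2, ha3⟩ := pv_inv_extend pre '[' start hlt hidx
          exact ⟨start, by simp [hstack], ha1, ha2, ha3⟩
    · by_cases hc2 : c = ']'
      · subst hc2
        by_cases hstack : stack = []
        · subst hstack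
          have ha : pvStepA (result, [], cur) ']' = (result, [], []) := by
            simp [pvStepA, pv_startswith_nil]
          have hb : pvStepB (pre ++ ']' :: rest) (result, ((([] : List Char)).length : Int), sb)
              ((pre.length : Int), ']') = (result, ((([] : List Char)).length : Int), sb) := by
            simp [pvStepB]
          rw [ha, hb, hpre, ← hn]
          apply ih (pre ++ [']']) result [] [] sb (fun _ => rfl) (fun h => absurd rfl h)
        · obtain ⟨start, rfl, hlt, hidx, rfl⟩ := h1 hstack
          have hL1 : 1 ≤ stack.length := List.length_pos_of_ne_nil hstack
          have hdl : pre.length + 1 - start = (pre.drop start).length + 1 := by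
            simp [List.length_drop]; omega
          by_cases hlen1 : stack.length = 1
          · have hdrop : stack.dropLast = [] := by
              rw [← List.length_eq_zero_iff, List.length_dropLast, hlen1]
            have ha : pvStepA (result, stack, pre.drop start) ']' =
                (if PySem.Chars.startswith (pre.drop start ++ [']']) pvTag then
                    result ++ [PySem.Chars.strip (pre.drop start ++ [']'])] else result,
                  ([] : List Char), ([] : List Char)) := by
              simp [pvStepA, hstack, hdrop]
            have hLc : ((stack.length : Nat) : Int) = 1 := by rw [hlen1]; rfl
            have hpart : PySem.List.slice (pre ++ ']' :: rest) (some (start : Int))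
                (some ((pre.length : Int) + 1)) = pre.drop start ++ [']'] := by
              have hcast : (pre.length : Int) + 1 = ((pre.length + 1 : Nat) : Int) := by
                push_cast; ring
              rw [hcast, PySem.List.slice_natCast,
                List.drop_append_of_le_length hlt.le, hdl, List.take_append]
              have h1t : (pre.drop start).length + 1 - (pre.drop start).length = 1 := by omega
              rw [h1t, List.take_of_length_le (by omega)]
              simp
            have hhead : (pre.drop start ++ [']']).head? = some '[' := by
              have : (pre.drop start).head? = some '[' := by
                rw [List.head?_drop]; exact hidx
              simp [List.head?_append, this]
            have hlast : (pre.drop start ++ [']']).getLast? = some ']' := by simp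
            have hstrip := pv_strip_eq_self _ hhead hlast
            have hb : pvStepB (pre ++ ']' :: rest) (result, (stack.length : Int), (start : Int))
                ((pre.length : Int), ']') =
                (if PySem.Chars.startswith (pre.drop start ++ [']']) pvTag then
                    result ++ [pre.drop start ++ [']']] else result,
                  ((([] : List Char)).length : Int), (start : Int)) := by
              rw [pvStepB]
              simp [hLc, hpart, (by decide : ¬(']' = '['))]
            rw [ha, hb, hpre, ← hn, hstrip]
            apply ih (pre ++ [']']) _ [] [] (start : Int) (fun _ => rfl) (fun h => absurd rfl h)
          · have hL2 : 2 ≤ stack.length := by omega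
            have hdl2 : stack.dropLast ≠ [] := by
              rw [← List.length_pos_iff, List.length_dropLast]; omega
            have ha : pvStepA (result, stack, pre.drop start) ']' =
                (result, stack.dropLast, pre.drop start ++ [']']) := by
              simp [pvStepA, hstack, hdl2]
            have hb : pvStepB (pre ++ ']' :: rest) (result, (stack.length : Int), (start : Int))
                ((pre.length : Int), ']') =
                (result, (stack.length : Int) - 1, (start : Int)) := by
              rw [pvStepB]
              have hne : (stack.length : Int) - 1 ≠ 0 := by
                have : (2 : Int) ≤ (stack.length : Int) := by exact_mod_cast hL2
                omega
              simp [hne, hstack, (by decide : ¬(']' = '['))]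
            have hLc : ((stack.dropLast.length : Nat) : Int) = (stack.length : Int) - 1 := by
              rw [List.length_dropLast]; push_cast [hL1]; ring
            rw [ha, hb, hpre, ← hn, ← hLc]
            apply ih (pre ++ [']']) result stack.dropLast (pre.drop start ++ [']'])
              (start : Int) (fun h => absurd h hdl2)
            intro _
            obtain ⟨ha1, ha2, ha3⟩ := pv_inv_extend pre ']' start hlt hidx
            exact ⟨start, rfl, ha1, ha2, ha3⟩
      · -- ordinary character
        by_cases hstack : stack = []
        · subst hstack
          have ha : pvStepA (result, [], cur) c = (result, [], []) := by
            simp [pvStepA, hc1, hc2, h0 rfl, pv_startswith_single c hc1]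
          have hb : pvStepB (pre ++ c :: rest) (result, ((([] : List Char)).length : Int), sb)
              ((pre.length : Int), c) = (result, ((([] : List Char)).length : Int), sb) := by
            simp [pvStepB, hc1, hc2]
          rw [ha, hb, hpre, ← hn]
          apply ih (pre ++ [c]) result [] [] sb (fun _ => rfl) (fun h => absurd rfl h)
        · obtain ⟨start, rfl, hlt, hidx, rfl⟩ := h1 hstack
          have ha : pvStepA (result, stack, pre.drop start) c =
              (result, stack, pre.drop start ++ [c]) := by
            simp [pvStepA, hc1, hc2, hstack]
          have hb : pvStepB (pre ++ c :: rest) (result, (stack.length : Int), (start : Int))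
              ((pre.length : Int), c) = (result, (stack.length : Int), (start : Int)) := by
            simp [pvStepB, hc1, hc2]
          rw [ha, hb, hpre, ← hn]
          apply ih (pre ++ [c]) result stack (pre.drop start ++ [c]) (start : Int) (fun h => absurd h hstack)
          intro _
          obtain ⟨ha1, ha2, ha3⟩ := pv_inv_extend pre c start hlt hidx
          exact ⟨start, rfl, ha1, ha2, ha3⟩

-- ===== VERDICT (by name: the statement is the Claim_ definition above) =====
theorem extract_file_parts_spec : Claim_equal_extract_file_parts := by
  intro text _
  unfold Spec_extract_file_parts extract_file_parts extract_file_parts_alt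
  have h := pv_loop text.toList [] [] [] [] 0 (fun _ => rfl) (fun h => absurd rfl h)
  simp only [List.nil_append, List.length_nil, Nat.cast_zero] at h
  simp only [h]
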